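-- pv_equiv track=rewrite | github.com/LyricLy/aoc | 2024/day14.py | cycles_for
-- ===== SOURCE A (Python) =====
-- def cycles_for(dx, width):
--     c = 0
--     i = 0
--     while True:
--         i += 1
--         c += dx
--         c %= width
--         if c == 0:
--             break
--     return i
-- ===== SOURCE B (Python) =====
-- def _gcd(a, b):
--     a, b = abs(a), abs(b)
--     while b:
--         a, b = b, a % b
--     return a
--
--
-- def cycles_for(dx, width):
--     return abs(width) // _gcd(dx, width)
-- ===== Notes on version B (the rewrite author's own statement) =====
-- stated objective: faster
-- what changed: Replaces A's step-by-step simulation of the residue (up to width/gcd iterations) by the closed form abs(width) // gcd(dx, width) computed with Euclid's algorithm.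
import Mathlib
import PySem

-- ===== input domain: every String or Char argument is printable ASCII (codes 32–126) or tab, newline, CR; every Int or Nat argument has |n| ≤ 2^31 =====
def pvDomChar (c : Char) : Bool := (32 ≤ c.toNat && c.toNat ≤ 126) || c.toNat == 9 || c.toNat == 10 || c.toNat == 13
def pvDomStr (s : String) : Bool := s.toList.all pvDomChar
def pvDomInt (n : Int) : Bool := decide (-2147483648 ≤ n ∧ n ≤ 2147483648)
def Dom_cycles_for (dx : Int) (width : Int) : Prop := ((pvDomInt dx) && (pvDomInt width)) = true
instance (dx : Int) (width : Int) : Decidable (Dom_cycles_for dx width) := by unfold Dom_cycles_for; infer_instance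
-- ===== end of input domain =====

-- B replaces A's step-by-step residue loop by the closed form abs(width) // gcd(dx, width)
-- (Euclid's algorithm), which is asymptotically faster; proved equal for width ≠ 0.

-- ===== PORT A =====
-- A's 'while True' loop; it terminates within |width| iterations (proved below),
-- so it is ported with fuel |width| (the fuel-0 branch is proved unreachable under Pre_).
def cyclesLoop (dx width : Int) : Nat → Int → Int → Int
  | 0, _, i => i
  | Nat.succ n, c, i =>
    if PySem.Int.mod (c + dx) width = 0 then i + 1
    else cyclesLoop dx width n (PySem.Int.mod (c + dx) width) (i + 1)

def cycles_for (dx : Int) (width : Int) : Int :=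
  cyclesLoop dx width width.natAbs 0 0

-- ===== PORT B =====
-- Source B's hand-written Euclid loop '_gcd' (after taking abs of both arguments)
def gcdLoop (a b : Nat) : Nat :=
  if h : b = 0 then a else gcdLoop b (a % b)
termination_by b
decreasing_by exact Nat.mod_lt _ (Nat.pos_of_ne_zero h)

def cycles_for_alt (dx : Int) (width : Int) : Int :=
  ((width.natAbs / gcdLoop dx.natAbs width.natAbs : Nat) : Int)

-- ===== PRECONDITION & SPEC =====
-- Python A raises ZeroDivisionError at 'c %= width' when width == 0; exactly those inputs are excluded.
def Pre_cycles_for (dx : Int) (width : Int) : Prop := width ≠ 0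
instance (dx : Int) (width : Int) : Decidable (Pre_cycles_for dx width) := by
  unfold Pre_cycles_for; infer_instance
def pvWitness_cycles_for : Int × Int := (1, 3)

def Spec_cycles_for (dx : Int) (width : Int) (out : Int) : Prop := out = cycles_for_alt dx width
instance (dx : Int) (width : Int) (out : Int) : Decidable (Spec_cycles_for dx width out) := by
  unfold Spec_cycles_for; infer_instance

-- ===== CLAIM (what is proved, stated in full; the proofs are below) =====
def Claim_equal_cycles_for : Prop := ∀ (dx : Int) (width : Int), Dom_cycles_for dx width → Pre_cycles_for dx width → Spec_cycles_for dx width (cycles_for dx width)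

-- ===== LEMMAS AND PROOFS =====

lemma gcdLoop_eq (a b : Nat) : gcdLoop a b = Nat.gcd a b := by
  fun_induction gcdLoop a b with
  | case1 a => simp
  | case2 a b h ih =>
      rw [ih, Nat.gcd_comm a b, Nat.gcd_rec b a,
        Nat.gcd_comm (a % b) b]

-- divisibility by width only depends on the residue class, and PySem mod keeps it
lemma dvd_mod_shift (width x y : Int) :
    (width ∣ PySem.Int.mod x width + y) ↔ (width ∣ x + y) := by
  have h := PySem.Int.floordiv_mul_add_mod x width
  have : PySem.Int.mod x width + y = (x + y) - PySem.Int.floordiv x width * width := by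
    omega
  rw [this]
  constructor
  · intro h'
    have := Int.dvd_add h' (Dvd.intro _ (mul_comm width (PySem.Int.floordiv x width)))
    simpa using this
  · intro h'
    exact Int.dvd_sub h' (Dvd.intro _ (mul_comm width (PySem.Int.floordiv x width)))

-- the loop returns i + j0 when j0 is the first positive step where width divides c + j0*dx
lemma cyclesLoop_eq (dx width : Int) :
    ∀ (n : Nat) (c i : Int) (j0 : Nat), 1 ≤ j0 → j0 ≤ n →
      (width ∣ c + (j0 : Int) * dx) →
      (∀ j : Nat, 1 ≤ j → j < j0 → ¬ width ∣ c + (j : Int) * dx) →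
      cyclesLoop dx width n c i = i + (j0 : Int) := by
  intro n
  induction n with
  | zero => intro c i j0 h1 h2 _ _; omega
  | succ n ih =>
      intro c i j0 h1 h2 hdvd hmin
      rw [cyclesLoop]
      by_cases hc : PySem.Int.mod (c + dx) width = 0
      · have hd1 : width ∣ c + (1 : Int) * dx := by
          have := (PySem.Int.mod_eq_zero_iff_dvd (c + dx) width).mp hc
          simpa using this
        have : j0 = 1 := by
          by_contra h
          exact hmin 1 (le_refl 1) (by omega) hd1
        rw [if_pos hc, this]; push_cast; ring
      · rw [if_neg hc]
        have hnd1 : ¬ width ∣ c + dx := by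
          intro h
          exact hc ((PySem.Int.mod_eq_zero_iff_dvd (c + dx) width).mpr h)
        have hj0 : 2 ≤ j0 := by
          rcases Nat.lt_or_ge j0 2 with h | h
          · interval_cases j0
            · exact absurd (by simpa using hdvd) hnd1
          · exact h
        have hdvd' : width ∣ PySem.Int.mod (c + dx) width + ((j0 - 1 : Nat) : Int) * dx := by
          rw [dvd_mod_shift]
          have : c + dx + ((j0 - 1 : Nat) : Int) * dx = c + (j0 : Int) * dx := by
            have : ((j0 - 1 : Nat) : Int) = (j0 : Int) - 1 := by omega
            rw [this]; ring
          rw [this]; exact hdvd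
        have hmin' : ∀ j : Nat, 1 ≤ j → j < j0 - 1 →
            ¬ width ∣ PySem.Int.mod (c + dx) width + (j : Int) * dx := by
          intro j hj hjlt h
          rw [dvd_mod_shift] at h
          have : c + dx + (j : Int) * dx = c + ((j + 1 : Nat) : Int) * dx := by
            push_cast; ring
          rw [this] at h
          exact hmin (j + 1) (by omega) (by omega) h
        have := ih (PySem.Int.mod (c + dx) width) (i + 1) (j0 - 1) (by omega) (by omega)
          hdvd' hmin'
        rw [this]
        have : ((j0 - 1 : Nat) : Int) = (j0 : Int) - 1 := by omega
        rw [this]; ring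

-- number theory core: with w = |width|, d = |dx|, g = gcd d w and width ≠ 0,
-- m = w / g is the least positive j with width ∣ j*dx
lemma dvd_iff_nat (width dx : Int) (j : Nat) :
    (width ∣ (j : Int) * dx) ↔ (width.natAbs ∣ j * dx.natAbs) := by
  rw [← Int.natAbs_dvd_natAbs, Int.natAbs_mul, Int.natAbs_natCast]

lemma m_dvd (d w : Nat) : w ∣ (w / Nat.gcd d w) * d := by
  have hg : Nat.gcd d w ∣ w := Nat.gcd_dvd_right d w
  have h : w / Nat.gcd d w * d = d * w / Nat.gcd d w := by
    rw [mul_comm, Nat.mul_div_assoc d hg]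
  have h2 : d * w / Nat.gcd d w = Nat.lcm d w := rfl
  rw [h, h2]
  exact Nat.dvd_lcm_right d w

lemma m_min (d w : Nat) (hw : 0 < w) (j : Nat) (hj : 0 < j) (hdvd : w ∣ j * d) :
    w / Nat.gcd d w ≤ j := by
  set g := Nat.gcd d w with hg
  have hgpos : 0 < g := Nat.gcd_pos_of_pos_right d hw
  have hgw : g ∣ w := Nat.gcd_dvd_right d w
  have hgd : g ∣ d := Nat.gcd_dvd_left d w
  have h1 : (w / g) ∣ j * (d / g) := by
    have : g * (w / g) ∣ g * (j * (d / g)) := by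
      rw [Nat.mul_div_cancel' hgw, mul_comm j (d / g) , ← mul_assoc,
        Nat.mul_div_cancel' hgd, mul_comm d j]
      exact hdvd
    exact (Nat.mul_dvd_mul_iff_left hgpos).mp this
  have hcop : Nat.Coprime (w / g) (d / g) :=
    (Nat.coprime_div_gcd_div_gcd (hg ▸ hgpos)).symm
  exact Nat.le_of_dvd hj (Nat.Coprime.dvd_of_dvd_mul_right hcop h1)

lemma m_pos (d w : Nat) (hw : 0 < w) : 0 < w / Nat.gcd d w :=
  Nat.div_pos (Nat.le_of_dvd hw (Nat.gcd_dvd_right d w)) (Nat.gcd_pos_of_pos_right d hw)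

-- ===== VERDICT (by name: the statement is the Claim_ definition above) =====
theorem cycles_for_spec : Claim_equal_cycles_for := by
  intro dx width _ hpre
  unfold Spec_cycles_for cycles_for cycles_for_alt
  rw [gcdLoop_eq]
  set w := width.natAbs with hw
  set d := dx.natAbs with hd
  have hwpos : 0 < w := Int.natAbs_pos.mpr hpre
  set m := w / Nat.gcd d w with hm
  have hm1 : 1 ≤ m := m_pos d w hwpos
  have hmw : m ≤ w := Nat.div_le_self _ _
  have hdvd : width ∣ (0 : Int) + (m : Int) * dx := by
    rw [zero_add, dvd_iff_nat]; exact m_dvd d w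
  have hmin : ∀ j : Nat, 1 ≤ j → j < m → ¬ width ∣ (0 : Int) + (j : Int) * dx := by
    intro j hj hjm h
    rw [zero_add, dvd_iff_nat] at h
    exact absurd (m_min d w hwpos j hj h) (by omega)
  have := cyclesLoop_eq dx width w 0 0 m hm1 hmw hdvd hmin
  rw [this, zero_add]
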